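-- pv_equiv track=rewrite | github.com/wilfredarin/Interviewbit | DP/kth-manhattan-distance-neighbourhood.py | solve
-- ===== SOURCE A (Python) =====
-- def solve(A, B):
--     n = len(B)
--     m = len(B[0])
--     dp = [[B[i][j] for j in range(m)] for i in range(n)]
--     dp_1 = [[B[i][j] for j in range(m)] for i in range(n)]
--     for k in range(A):
--         for i in range(n):
--             for j in range(m):
--                 dp_1[i][j] = max(dp[i][j], dp[i-1][j] if i>0 else 0, dp[i+1][j] if i<n-1 else 0,
--                 dp[i][j-1] if j>0 else 0,dp[i][j+1] if j<m-1 else 0)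
--         dp_1,dp = dp,dp_1
--     return dp
-- ===== SOURCE B (Python) =====
-- def solve(A, B):
--     # A iterated 4-neighbour relaxations on the zero-padded grid equal one maximum
--     # over the Manhattan ball of radius A; radii beyond n+m add nothing new.
--     n, m = len(B), len(B[0])
--     k = min(max(A, 0), n + m)
--
--     def val(p, q):
--         return B[p][q] if 0 <= p < n and 0 <= q < m else 0
--
--     return [[max(val(i + di, j + dj)
--                  for di in range(-k, k + 1)
--                  for dj in range(abs(di) - k, k - abs(di) + 1))
--              for j in range(m)]
--             for i in range(n)]
-- ===== Notes on version B (the rewrite author's own statement) =====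
-- stated objective: alternative
-- what changed: B replaces A's A-fold iterated 4-neighbour relaxation (dynamic programming) by a single per-cell maximum over the Manhattan ball of radius min(A, n+m) on the zero-padded grid; Pre_ excludes only inputs where A raises IndexError (empty B or a row shorter than the first row).
import Mathlib
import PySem

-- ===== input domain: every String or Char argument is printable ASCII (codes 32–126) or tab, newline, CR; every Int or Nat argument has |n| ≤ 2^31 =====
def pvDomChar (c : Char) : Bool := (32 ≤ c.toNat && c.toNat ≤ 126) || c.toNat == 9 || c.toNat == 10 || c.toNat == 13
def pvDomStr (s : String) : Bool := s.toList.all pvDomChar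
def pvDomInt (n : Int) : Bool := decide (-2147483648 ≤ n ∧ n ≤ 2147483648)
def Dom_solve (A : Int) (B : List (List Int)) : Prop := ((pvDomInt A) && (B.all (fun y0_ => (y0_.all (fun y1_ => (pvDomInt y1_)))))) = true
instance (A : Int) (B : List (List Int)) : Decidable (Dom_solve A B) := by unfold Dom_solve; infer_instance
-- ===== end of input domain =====

-- B replaces A's A-fold iterated 4-neighbour relaxation by a single per-cell maximum over the
-- Manhattan ball of radius min(A, n+m) on the zero-padded grid; objective: alternative algorithm.

-- ===== PORT A =====
-- B[i][j] for loop counters i,j (always ≥ 0; in range under Pre_solve)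
def gget (B : List (List Int)) (i j : Nat) : Int := (B.getD i []).getD j 0

-- one sweep of A's inner double loop writing dp_1 from dp (Python's 5-argument max is left-nested)
def stepA (n m : Nat) (dp : List (List Int)) : List (List Int) :=
  (List.range n).map fun i => (List.range m).map fun j =>
    max (max (max (max (gget dp i j)
        (if 0 < i then gget dp (i-1) j else 0))
        (if i < n-1 then gget dp (i+1) j else 0))
        (if 0 < j then gget dp i (j-1) else 0))
        (if j < m-1 then gget dp i (j+1) else 0)

def solve (A : Int) (B : List (List Int)) : List (List Int) :=
  let n := B.length
  let m := (B.headD []).length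
  let dp := (List.range n).map fun i => (List.range m).map fun j => gget B i j
  (List.range A.toNat).foldl (fun dp _ => stepA n m dp) dp

-- ===== PORT B =====
-- Source B's val(p, q): the grid read on the zero-padded plane
def pvVal (B : List (List Int)) (n m : Nat) (p q : Int) : Int :=
  if 0 ≤ p ∧ p < (n : Int) ∧ 0 ≤ q ∧ q < (m : Int) then gget B p.toNat q.toNat else 0

def solve_alt (A : Int) (B : List (List Int)) : List (List Int) :=
  let n := B.length
  let m := (B.headD []).length
  let k : Int := min (max A 0) ((n : Int) + (m : Int))
  (List.range n).map fun (i : Nat) => (List.range m).map fun (j : Nat) =>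
    let vals :=
      (PySem.List.pyRange (-k) (k+1) 1).flatMap fun di =>
        (PySem.List.pyRange ((di.natAbs : Int) - k) (k - (di.natAbs : Int) + 1) 1).map fun dj =>
          pvVal B n m ((i : Int) + di) ((j : Int) + dj)
    -- Python's max over the generator; the [] branch is unreachable (k ≥ 0)
    match vals with
    | [] => 0
    | v :: rest => rest.foldl max v

-- ===== PRECONDITION & SPEC =====
-- Pre_solve excludes exactly the inputs where Python A raises: empty B (B[0] → IndexError) and
-- rows shorter than the first row (B[i][j] → IndexError).
def Pre_solve (A : Int) (B : List (List Int)) : Prop :=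
  B ≠ [] ∧ ∀ r ∈ B, (B.headD []).length ≤ r.length
instance (A : Int) (B : List (List Int)) : Decidable (Pre_solve A B) := by unfold Pre_solve; infer_instance

def pvWitness_solve : Int × List (List Int) := (2, [[1, -2], [3, 4], [-5, 6]])

def Spec_solve (A : Int) (B : List (List Int)) (out : List (List Int)) : Prop := out = solve_alt A B
instance (A : Int) (B : List (List Int)) (out : List (List Int)) : Decidable (Spec_solve A B out) := by unfold Spec_solve; infer_instance

-- ===== CLAIM (what is proved, stated in full; the proofs are below) =====
def Claim_equal_solve : Prop := ∀ (A : Int) (B : List (List Int)), Dom_solve A B → Pre_solve A B → Spec_solve A B (solve A B)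

-- ===== LEMMAS AND PROOFS =====

-- the grid padded with 0 outside [0,n)×[0,m): exactly the value A's guarded neighbour reads use
def pad (n m : Nat) (g : Nat → Nat → Int) (p q : Int) : Int :=
  if 0 ≤ p ∧ p < (n : Int) ∧ 0 ≤ q ∧ q < (m : Int) then g p.toNat q.toNat else 0

-- A's iteration as a function on ℤ²: F k is dp after k sweeps (0 outside the grid)
def F (n m : Nat) (g : Nat → Nat → Int) : Nat → Int → Int → Int
  | 0, p, q => pad n m g p q
  | k+1, p, q =>
    if 0 ≤ p ∧ p < (n : Int) ∧ 0 ≤ q ∧ q < (m : Int) then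
      max (max (max (max (F n m g k p q) (F n m g k (p-1) q)) (F n m g k (p+1) q))
        (F n m g k p (q-1))) (F n m g k p (q+1))
    else 0

noncomputable def ball (k : Nat) (i j : Int) : Finset (Int × Int) :=
  (Finset.Icc (i - (k:Int)) (i + k) ×ˢ Finset.Icc (j - (k:Int)) (j + k)).filter
    fun pq => (pq.1 - i).natAbs + (pq.2 - j).natAbs ≤ k

lemma mem_ball_mk {k : Nat} {i j a b : Int} :
    (a, b) ∈ ball k i j ↔ (a - i).natAbs + (b - j).natAbs ≤ k := by
  simp only [ball, Finset.mem_filter, Finset.mem_product, Finset.mem_Icc]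
  constructor
  · exact fun h => h.2
  · intro h; refine ⟨⟨⟨?_, ?_⟩, ?_, ?_⟩, h⟩ <;> omega

lemma ball_nonempty (k : Nat) (i j : Int) : (ball k i j).Nonempty :=
  ⟨(i, j), mem_ball_mk.mpr (by simp)⟩

-- maximum of the padded grid over the Manhattan ball of radius k
noncomputable def M (n m : Nat) (g : Nat → Nat → Int) (k : Nat) (i j : Int) : Int :=
  (ball k i j).sup' (ball_nonempty k i j) fun pq => pad n m g pq.1 pq.2

lemma F_out {n m : Nat} {g : Nat → Nat → Int} {k : Nat} {p q : Int}
    (h : ¬(0 ≤ p ∧ p < (n : Int) ∧ 0 ≤ q ∧ q < (m : Int))) : F n m g k p q = 0 := by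
  cases k with
  | zero => simp [F, pad, h]
  | succ k => simp [F, h]

lemma pad_le_M {n m : Nat} {g : Nat → Nat → Int} {k : Nat} {i j : Int} {pq : Int × Int}
    (h : pq ∈ ball k i j) : pad n m g pq.1 pq.2 ≤ M n m g k i j := by
  unfold M; exact Finset.le_sup' (fun pq => pad n m g pq.1 pq.2) h

lemma M_mono {n m : Nat} {g : Nat → Nat → Int} {k k' : Nat} {i j i' j' : Int}
    (h : ∀ pq ∈ ball k i j, pq ∈ ball k' i' j') : M n m g k i j ≤ M n m g k' i' j' := by
  unfold M
  apply Finset.sup'_le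
  intro pq hpq
  exact Finset.le_sup' (fun pq => pad n m g pq.1 pq.2) (h pq hpq)

lemma pad_le_F {n m : Nat} {g : Nat → Nat → Int} (k : Nat) {p q : Int}
    (h : 0 ≤ p ∧ p < (n : Int) ∧ 0 ≤ q ∧ q < (m : Int)) : pad n m g p q ≤ F n m g k p q := by
  induction k with
  | zero => simp [F]
  | succ k ih =>
    calc pad n m g p q ≤ F n m g k p q := ih
    _ ≤ _ := by
      simp only [F, if_pos h]
      exact le_trans (le_max_left _ _) (le_trans (le_max_left _ _)
        (le_trans (le_max_left _ _) (le_max_left _ _)))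

lemma F_eq_M {n m : Nat} {g : Nat → Nat → Int} :
    ∀ (k : Nat) (p q : Int), 0 ≤ p → p < (n : Int) → 0 ≤ q → q < (m : Int) →
      F n m g k p q = M n m g k p q := by
  intro k
  induction k with
  | zero =>
    intro p q hp0 hpn hq0 hqm
    have hin : 0 ≤ p ∧ p < (n : Int) ∧ 0 ≤ q ∧ q < (m : Int) := ⟨hp0, hpn, hq0, hqm⟩
    apply le_antisymm
    · exact pad_le_M (mem_ball_mk.mpr (by simp))
    · apply Finset.sup'_le
      rintro ⟨a, b⟩ hmem
      rw [mem_ball_mk] at hmem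
      have : a = p ∧ b = q := by omega
      simp [F, this.1, this.2]
  | succ k ih =>
    intro p q hp0 hpn hq0 hqm
    have hin : 0 ≤ p ∧ p < (n : Int) ∧ 0 ≤ q ∧ q < (m : Int) := ⟨hp0, hpn, hq0, hqm⟩
    have hF : F n m g (k+1) p q =
        max (max (max (max (F n m g k p q) (F n m g k (p-1) q)) (F n m g k (p+1) q))
          (F n m g k p (q-1))) (F n m g k p (q+1)) := by
      simp only [F, if_pos hin]
    have key : ∀ a b : Int, (a - p).natAbs + (b - q).natAbs ≤ 1 →
        F n m g k a b ≤ M n m g (k+1) p q := by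
      intro a b hd
      by_cases hr : 0 ≤ a ∧ a < (n : Int) ∧ 0 ≤ b ∧ b < (m : Int)
      · rw [ih a b hr.1 hr.2.1 hr.2.2.1 hr.2.2.2]
        apply M_mono
        rintro ⟨x, y⟩ hxy
        rw [mem_ball_mk] at *
        omega
      · rw [F_out hr]
        have h0 : pad n m g a b = 0 := by rw [pad, if_neg hr]
        calc (0:Int) = pad n m g a b := h0.symm
        _ ≤ M n m g (k+1) p q := pad_le_M (mem_ball_mk.mpr (by omega))
    apply le_antisymm
    · rw [hF]
      have h1 : F n m g k p q ≤ M n m g (k+1) p q := key p q (by omega)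
      have h2 := key (p-1) q (by omega)
      have h3 := key (p+1) q (by omega)
      have h4 := key p (q-1) (by omega)
      have h5 := key p (q+1) (by omega)
      exact max_le (max_le (max_le (max_le h1 h2) h3) h4) h5
    · apply Finset.sup'_le
      rintro ⟨a, b⟩ hmem
      rw [mem_ball_mk] at hmem
      by_cases hc : a = p ∧ b = q
      · rw [hc.1, hc.2, hF]
        exact le_trans (pad_le_F k hin) (le_trans (le_max_left _ _) (le_trans (le_max_left _ _)
          (le_trans (le_max_left _ _) (le_max_left _ _))))
      · have hcases : a < p ∨ p < a ∨ (a = p ∧ b < q) ∨ (a = p ∧ q < b) := by omega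
        have toward : ∀ a' b' : Int, (a - a').natAbs + (b - b').natAbs ≤ k →
            (¬(0 ≤ a' ∧ a' < (n:Int) ∧ 0 ≤ b' ∧ b' < (m:Int)) → pad n m g a b = 0) →
            pad n m g a b ≤ F n m g k a' b' := by
          intro a' b' hdist hout
          by_cases hr : 0 ≤ a' ∧ a' < (n : Int) ∧ 0 ≤ b' ∧ b' < (m : Int)
          · rw [ih a' b' hr.1 hr.2.1 hr.2.2.1 hr.2.2.2]
            exact pad_le_M (mem_ball_mk.mpr hdist)
          · rw [F_out hr, hout hr]
        rw [hF]
        rcases hcases with h | h | ⟨he, h⟩ | ⟨he, h⟩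
        · refine le_trans (toward (p-1) q (by omega) ?_) (le_trans (le_max_right _ _)
            (le_trans (le_max_left _ _) (le_trans (le_max_left _ _) (le_max_left _ _))))
          intro hr; rw [pad, if_neg (by omega)]
        · refine le_trans (toward (p+1) q (by omega) ?_) (le_trans (le_max_right _ _)
            (le_trans (le_max_left _ _) (le_max_left _ _)))
          intro hr; rw [pad, if_neg (by omega)]
        · subst he
          refine le_trans (toward a (q-1) (by omega) ?_) (le_trans (le_max_right _ _)
            (le_max_left _ _))
          intro hr; rw [pad, if_neg (by omega)]
        · subst he
          refine le_trans (toward a (q+1) (by omega) ?_) (le_max_right _ _)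
          intro hr; rw [pad, if_neg (by omega)]

-- the ball maximum stabilises once the radius reaches n+m
lemma M_stab {n m : Nat} {g : Nat → Nat → Int} {k : Nat} {p q : Int}
    (hp0 : 0 ≤ p) (hpn : p < (n : Int)) (hq0 : 0 ≤ q) (hqm : q < (m : Int))
    (hk : n + m ≤ k) : M n m g k p q = M n m g (n + m) p q := by
  apply le_antisymm
  · apply Finset.sup'_le
    rintro ⟨a, b⟩ hmem
    rw [mem_ball_mk] at hmem
    by_cases hr : 0 ≤ a ∧ a < (n : Int) ∧ 0 ≤ b ∧ b < (m : Int)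
    · exact pad_le_M (mem_ball_mk.mpr (by omega))
    · rw [pad, if_neg hr]
      have hout : pad n m g (p - ((n:Int) + m)) q = 0 := by rw [pad, if_neg (by omega)]
      calc (0:Int) = pad n m g (p - ((n:Int) + m)) q := hout.symm
      _ ≤ M n m g (n + m) p q := pad_le_M (mem_ball_mk.mpr (by omega))
  · refine M_mono (fun pq hpq => ?_)
    obtain ⟨a, b⟩ := pq
    rw [mem_ball_mk] at *
    omega

-- ========== A-side bridge: the list program computes F ==========

def repr2 (n m : Nat) (f : Nat → Nat → Int) : List (List Int) :=
  (List.range n).map fun i => (List.range m).map fun j => f i j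

lemma gget_repr {n m : Nat} (f : Nat → Nat → Int) {i j : Nat} (hi : i < n) (hj : j < m) :
    gget (repr2 n m f) i j = f i j := by
  simp [repr2, gget, List.getD_eq_getElem?_getD, hi, hj]

lemma step_repr (n m : Nat) (g : Nat → Nat → Int) (k : Nat) :
    stepA n m (repr2 n m (fun i j => F n m g k i j))
      = repr2 n m (fun i j => F n m g (k+1) i j) := by
  unfold stepA
  conv_rhs => rw [repr2]
  apply List.map_congr_left
  intro i hi
  rw [List.mem_range] at hi
  apply List.map_congr_left
  intro j hj
  rw [List.mem_range] at hj
  have hin : (0:Int) ≤ (i:Int) ∧ (i:Int) < (n : Int) ∧ (0:Int) ≤ (j:Int) ∧ (j:Int) < (m : Int) := by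
    refine ⟨by positivity, by exact_mod_cast hi, by positivity, by exact_mod_cast hj⟩
  have e1 : gget (repr2 n m (fun i j => F n m g k (i:Int) (j:Int))) i j
      = F n m g k (i:Int) (j:Int) := gget_repr _ hi hj
  have e2 : (if 0 < i then gget (repr2 n m (fun i j => F n m g k (i:Int) (j:Int))) (i-1) j else 0)
      = F n m g k ((i:Int)-1) (j:Int) := by
    split_ifs with h
    · rw [gget_repr _ (by omega) hj]
      congr 1; omega
    · rw [F_out (by intro hc; omega)]
  have e3 : (if i < n-1 then gget (repr2 n m (fun i j => F n m g k (i:Int) (j:Int))) (i+1) j else 0)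
      = F n m g k ((i:Int)+1) (j:Int) := by
    split_ifs with h
    · rw [gget_repr _ (by omega) hj]
      congr 1
    · rw [F_out (by intro hc; omega)]
  have e4 : (if 0 < j then gget (repr2 n m (fun i j => F n m g k (i:Int) (j:Int))) i (j-1) else 0)
      = F n m g k (i:Int) ((j:Int)-1) := by
    split_ifs with h
    · rw [gget_repr _ hi (by omega)]
      congr 1; omega
    · rw [F_out (by intro hc; omega)]
  have e5 : (if j < m-1 then gget (repr2 n m (fun i j => F n m g k (i:Int) (j:Int))) i (j+1) else 0)
      = F n m g k (i:Int) ((j:Int)+1) := by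
    split_ifs with h
    · rw [gget_repr _ hi (by omega)]
      congr 1
    · rw [F_out (by intro hc; omega)]
  rw [e1, e2, e3, e4, e5]
  simp only [F, if_pos hin]

lemma solve_repr (A : Int) (B : List (List Int)) :
    solve A B = repr2 B.length (B.headD []).length
      (fun i j => F B.length (B.headD []).length (gget B) A.toNat (i:Int) (j:Int)) := by
  show (List.range A.toNat).foldl (fun dp _ => stepA B.length (B.headD []).length dp) _ = _
  have base : ((List.range B.length).map fun i =>
      (List.range (B.headD []).length).map fun j => gget B i j)
      = repr2 B.length (B.headD []).length
          (fun i j => F B.length (B.headD []).length (gget B) 0 (i:Int) (j:Int)) := by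
    unfold repr2
    apply List.map_congr_left; intro i hi
    apply List.map_congr_left; intro j hj
    rw [List.mem_range] at hi hj
    simp only [F, pad]
    rw [if_pos (by refine ⟨by positivity, by exact_mod_cast hi, by positivity, by exact_mod_cast hj⟩)]
    simp
  rw [base]
  generalize A.toNat = t
  induction t with
  | zero => simp
  | succ t ih => rw [List.range_succ, List.foldl_append, ih, List.foldl_cons, List.foldl_nil, step_repr]

-- ========== B-side bridge: the ball fold computes M ==========

lemma le_foldl_max : ∀ (l : List Int) (b : Int), b ≤ l.foldl max b := by
  intro l
  induction l with
  | nil => intro b; simp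
  | cons x l ih => intro b; exact le_trans (le_max_left b x) (ih (max b x))

lemma mem_le_foldl_max : ∀ (l : List Int) (b x : Int), x ∈ l → x ≤ l.foldl max b := by
  intro l
  induction l with
  | nil => intro b x hx; simp at hx
  | cons y l ih =>
    intro b x hx
    rcases List.mem_cons.mp hx with h | h
    · subst h; exact le_trans (le_max_right b x) (le_foldl_max l _)
    · exact ih _ x h

lemma foldl_max_mem : ∀ (l : List Int) (b : Int), l.foldl max b = b ∨ l.foldl max b ∈ l := by
  intro l
  induction l with
  | nil => intro b; left; rfl
  | cons y l ih =>
    intro b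
    rw [List.foldl_cons]
    rcases ih (max b y) with h | h
    · rcases max_cases b y with ⟨he, _⟩ | ⟨he, _⟩
      · left; rw [h, he]
      · right; rw [h, he]; exact List.mem_cons_self
    · right; exact List.mem_cons_of_mem _ h

-- the membership characterisation of B's generated value list
lemma mem_vals_iff {n m : Nat} (g : Nat → Nat → Int) {k : Int} (hk : 0 ≤ k) (i j : Nat) (x : Int) :
    (x ∈ (PySem.List.pyRange (-k) (k+1) 1).flatMap fun di =>
        (PySem.List.pyRange ((di.natAbs : Int) - k) (k - (di.natAbs : Int) + 1) 1).map fun dj =>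
          pad n m g ((i : Int) + di) ((j : Int) + dj))
    ↔ ∃ a b : Int, (a - i).natAbs + (b - j).natAbs ≤ k.toNat ∧ x = pad n m g a b := by
  simp only [List.mem_flatMap, List.mem_map, PySem.List.mem_pyRange_one]
  constructor
  · rintro ⟨di, ⟨h1, h2⟩, dj, ⟨h3, h4⟩, rfl⟩
    exact ⟨(i : Int) + di, (j : Int) + dj, by omega, rfl⟩
  · rintro ⟨a, b, hd, rfl⟩
    refine ⟨a - i, ⟨by omega, by omega⟩, b - j, ⟨by omega, by omega⟩, ?_⟩
    congr 1 <;> omega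

-- B's per-cell expression computes the ball maximum M
lemma cell_eq_M {n m : Nat} (g : Nat → Nat → Int) {k : Int} (hk : 0 ≤ k) (i j : Nat) :
    (match (PySem.List.pyRange (-k) (k+1) 1).flatMap (fun di =>
        (PySem.List.pyRange ((di.natAbs : Int) - k) (k - (di.natAbs : Int) + 1) 1).map fun dj =>
          pad n m g ((i : Int) + di) ((j : Int) + dj)) with
      | [] => 0
      | v :: rest => rest.foldl max v)
    = M n m g k.toNat (i : Int) (j : Int) := by
  set vals := (PySem.List.pyRange (-k) (k+1) 1).flatMap (fun di =>
      (PySem.List.pyRange ((di.natAbs : Int) - k) (k - (di.natAbs : Int) + 1) 1).map fun dj =>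
        pad n m g ((i : Int) + di) ((j : Int) + dj)) with hvals
  have hcentre : pad n m g (i : Int) (j : Int) ∈ vals := by
    rw [hvals, mem_vals_iff g hk]
    exact ⟨(i : Int), (j : Int), by omega, rfl⟩
  cases hv : vals with
  | nil => rw [hv] at hcentre; simp at hcentre
  | cons v rest =>
    show rest.foldl max v = M n m g k.toNat (i : Int) (j : Int)
    have hvmem : v ∈ vals := by rw [hv]; exact List.mem_cons_self
    apply le_antisymm
    · -- the fold's result is some element of vals, hence ≤ M
      have : rest.foldl max v = v ∨ rest.foldl max v ∈ rest := foldl_max_mem rest v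
      have hres : rest.foldl max v ∈ vals := by
        rcases this with h | h
        · rw [h]; exact hvmem
        · rw [hv]; exact List.mem_cons_of_mem _ h
      rw [hvals, mem_vals_iff g hk] at hres
      obtain ⟨a, b, hd, he⟩ := hres
      rw [he]
      exact pad_le_M (mem_ball_mk.mpr hd)
    · -- every ball point's value is in vals, hence ≤ the fold's result
      unfold M
      apply Finset.sup'_le
      rintro ⟨a, b⟩ hmem
      rw [mem_ball_mk] at hmem
      have : pad n m g a b ∈ vals := by
        rw [hvals, mem_vals_iff g hk]
        exact ⟨a, b, hmem, rfl⟩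
      rw [hv] at this
      rcases List.mem_cons.mp this with h | h
      · rw [h]; exact le_foldl_max rest v
      · exact mem_le_foldl_max rest v _ h

-- the clamp k = min(max(A,0), n+m) does not change the ball maximum for in-grid cells
lemma M_clamp {n m : Nat} (g : Nat → Nat → Int) (A : Int) {i j : Nat} (hi : i < n) (hj : j < m) :
    M n m g A.toNat (i:Int) (j:Int)
      = M n m g (min (max A 0) ((n:Int)+(m:Int))).toNat (i:Int) (j:Int) := by
  by_cases hle : A ≤ (n:Int)+(m:Int)
  · have : (min (max A 0) ((n:Int)+(m:Int))).toNat = A.toNat := by omega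
    rw [this]
  · have h1 : (min (max A 0) ((n:Int)+(m:Int))).toNat = n + m := by omega
    rw [h1]
    exact M_stab (by omega) (by omega) (by omega) (by omega) (by omega)

theorem solve_eq_alt (A : Int) (B : List (List Int)) : solve A B = solve_alt A B := by
  rw [solve_repr]
  unfold solve_alt repr2
  apply List.map_congr_left
  intro i hi
  rw [List.mem_range] at hi
  apply List.map_congr_left
  intro j hj
  rw [List.mem_range] at hj
  beta_reduce
  rw [F_eq_M A.toNat (i:Int) (j:Int) (by omega) (by omega) (by omega) (by omega)]
  rw [M_clamp (gget B) A hi hj]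
  have hk : (0:Int) ≤ min (max A 0) ((B.length:Int)+((B.headD []).length:Int)) := by omega
  rw [← cell_eq_M (gget B) hk i j]
  rfl

-- ===== VERDICT (by name: the statement is the Claim_ definition above) =====
theorem solve_spec : Claim_equal_solve := by
  intro A B _ _
  unfold Spec_solve
  exact solve_eq_alt A B
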